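-- pv_equiv track=rewrite | github.com/Lammatian/AdventOfCode | 2021/src/day03/main.py | part1
-- ===== SOURCE A (Python) =====
-- def part1(inp):
--     counts = {i: 0 for i in range(len(inp[0]))}
--     for bin in inp:
--         for i, v in enumerate(bin):
--             if v == '1':
--                 counts[i] += 1
--
--     res = int(''.join(['1' if counts[i] > len(inp)//2 else '0' for i in range(len(inp[0]))]), 2)
--
--     return res * ((1 << len(inp[0])) - res - 1)
-- ===== SOURCE B (Python) =====
-- def part1(inp):
--     half = len(inp) // 2
--     gamma = epsilon = 0
--     for i in range(len(inp[0])):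
--         ones = sum(1 for row in inp if i < len(row) and row[i] == '1')
--         if ones > half:
--             gamma, epsilon = gamma * 2 + 1, epsilon * 2
--         else:
--             gamma, epsilon = gamma * 2, epsilon * 2 + 1
--     return gamma * epsilon
-- ===== Notes on version B (the rewrite author's own statement) =====
-- stated objective: simpler
-- what changed: B replaces A's row-wise dict of per-column counts, the joined bit-string, int(...,2) parse and the algebraic res*((1<<L)-res-1) trick by a single column-first loop that counts the ones of each column directly and accumulates gamma and epsilon as two integers, returning gamma*epsilon.
import Mathlib
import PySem

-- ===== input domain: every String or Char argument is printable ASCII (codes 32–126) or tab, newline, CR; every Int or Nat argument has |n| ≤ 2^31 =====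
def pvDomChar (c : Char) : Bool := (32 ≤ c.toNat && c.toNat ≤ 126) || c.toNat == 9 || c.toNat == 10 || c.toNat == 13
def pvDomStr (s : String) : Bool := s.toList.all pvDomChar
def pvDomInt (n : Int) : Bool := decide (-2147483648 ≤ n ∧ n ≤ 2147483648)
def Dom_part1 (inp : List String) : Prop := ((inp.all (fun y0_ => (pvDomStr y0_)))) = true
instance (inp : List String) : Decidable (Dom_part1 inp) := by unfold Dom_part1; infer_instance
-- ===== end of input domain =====

-- B replaces A's dict of per-column counts + bit-string + int(...,2) + algebraic trick by one column-first
-- loop accumulating gamma and epsilon as integers (objective: simpler).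

-- ===== PORT A =====
-- int(s, 2) ported by hand: exact for the argument it receives here under Pre_part1 — a NONEMPTY string of
-- '0'/'1' characters built by the join below (int('', 2) raises ValueError; Pre_part1 excludes that input).
def pvInt2 (cs : List Char) : Int :=
  cs.foldl (fun a c => 2 * a + (if c = '1' then 1 else 0)) 0

-- counts[i] += 1 raises KeyError when i is not a key, and inp[0] raises IndexError on []: both totalized
-- with getD/pyGetD defaults, exact under Pre_part1 (which excludes exactly those inputs).
def part1 (inp : List String) : Int :=
  let L : Int := PySem.Str.len (PySem.List.pyGetD inp 0 "")
  let counts0 : PySem.Dict Int Int :=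
    (PySem.List.pyRange 0 L 1).foldl (fun d i => d.insert i 0) PySem.Dict.empty
  let counts := inp.foldl (fun d bin =>
    (PySem.List.enumerate bin.toList 0).foldl
      (fun d p => if p.2 = '1' then d.insert p.1 (d.getD p.1 0 + 1) else d) d) counts0
  let res := pvInt2 (PySem.Str.join "" ((PySem.List.pyRange 0 L 1).map
      (fun i => if counts.getD i 0 > PySem.Int.floordiv (PySem.List.len inp) 2 then "1" else "0"))).toList
  res * ((1 <<< L.toNat) - res - 1)

-- ===== PORT B =====
def part1_alt (inp : List String) : Int :=
  let half := PySem.Int.floordiv (PySem.List.len inp) 2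
  let ge := (PySem.List.pyRange 0 (PySem.Str.len (PySem.List.pyGetD inp 0 "")) 1).foldl
    (fun (ge : Int × Int) i =>
      let ones := inp.foldl (fun acc row =>
        if i < PySem.Str.len row ∧ PySem.Str.pyGet? row i = some '1' then acc + 1 else acc) (0 : Int)
      if ones > half then (ge.1 * 2 + 1, ge.2 * 2) else (ge.1 * 2, ge.2 * 2 + 1))
    ((0 : Int), (0 : Int))
  ge.1 * ge.2

-- ===== PRECONDITION & SPEC =====
-- Exactly where Python A returns: a nonempty report whose first row is nonempty, and no row carries a '1'
-- at a column index ≥ len(inp[0]) (there A raises IndexError / ValueError / KeyError respectively).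
def Pre_part1 (inp : List String) : Prop :=
  inp ≠ [] ∧ 1 ≤ PySem.Str.len (PySem.List.pyGetD inp 0 "") ∧
  ∀ row ∈ inp, '1' ∉ row.toList.drop (PySem.Str.len (PySem.List.pyGetD inp 0 "")).toNat
instance (inp : List String) : Decidable (Pre_part1 inp) := by unfold Pre_part1; infer_instance
def pvWitness_part1 : List String := (["10", "01", "11"])

def Spec_part1 (inp : List String) (out : Int) : Prop := out = part1_alt inp
instance (inp : List String) (out : Int) : Decidable (Spec_part1 inp out) := by unfold Spec_part1; infer_instance

-- ===== CLAIM (what is proved, stated in full; the proofs are below) =====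
def Claim_equal_part1 : Prop := ∀ (inp : List String), Dom_part1 inp → Pre_part1 inp → Spec_part1 inp (part1 inp)

-- ===== LEMMAS AND PROOFS =====


-- the zero-initialisation loop leaves every lookup at 0
theorem pv_init_getD (l : List Int) (d : PySem.Dict Int Int) (h : ∀ j, d.getD j 0 = 0) (i : Int) :
    (l.foldl (fun d i => d.insert i (0:Int)) d).getD i 0 = 0 := by
  induction l generalizing d with
  | nil => exact h i
  | cons x t ih =>
      refine ih _ (fun j => ?_)
      rw [PySem.Dict.getD_insert]
      split
      · rfl
      · exact h j

-- one row of A's counting loop adds 1 exactly at the index of each '1' character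
theorem pv_inner (cs : List Char) (s i : Int) (d : PySem.Dict Int Int) :
    ((PySem.List.enumerate cs s).foldl
        (fun d p => if p.2 = '1' then d.insert p.1 (d.getD p.1 0 + 1) else d) d).getD i 0
    = d.getD i 0 + (if s ≤ i ∧ cs[(i - s).toNat]? = some '1' then 1 else 0) := by
  induction cs generalizing s d with
  | nil => simp [PySem.List.enumerate_nil]
  | cons c t ih =>
      rw [PySem.List.enumerate_cons, List.foldl_cons, ih]
      by_cases hi : i = s
      · subst hi
        have h1 : ¬ (i + 1 ≤ i) := by omega
        have h2 : (i - i).toNat = 0 := by omega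
        simp only [h1, false_and, if_false, h2, add_zero, List.getElem?_cons_zero, le_refl,
          true_and, Option.some.injEq]
        by_cases hc : c = '1'
        · simp [hc, PySem.Dict.getD_insert_self]
        · simp [hc]
      · have hne : (if c = '1' then d.insert s (d.getD s 0 + 1) else d).getD i 0 = d.getD i 0 := by
          split
          · rw [PySem.Dict.getD_insert]
            simp [hi]
          · rfl
        rw [hne]
        congr 1
        by_cases hs : s + 1 ≤ i
        · have h3 : (i - s).toNat = (i - (s + 1)).toNat + 1 := by omega
          have h4 : s ≤ i := by omega
          rw [h3]
          simp [h4, hs]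
        · have h4 : ¬ s ≤ i := by omega
          simp [h4, hs]

-- the whole counting loop: counts[i] is the number of rows with a '1' in column i
theorem pv_outer (rows : List String) (d : PySem.Dict Int Int) (i : Int) (h : 0 ≤ i) :
    (rows.foldl (fun d bin => (PySem.List.enumerate bin.toList 0).foldl
        (fun d p => if p.2 = '1' then d.insert p.1 (d.getD p.1 0 + 1) else d) d) d).getD i 0
    = d.getD i 0 + (rows.countP (fun row => decide (row.toList[i.toNat]? = some '1')) : Int) := by
  induction rows generalizing d with
  | nil => simp
  | cons r t ih =>
      rw [List.foldl_cons, ih, pv_inner]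
      have h0 : (i - 0).toNat = i.toNat := by omega
      rw [h0, List.countP_cons]
      push_cast
      split_ifs with hA hB hB
      · simp_all
        ring
      · simp_all
      · simp_all
      · simp_all

-- the string of '0'/'1' pieces that A joins, as a character list
theorem pv_toList_join (l : List Int) (P : Int → Prop) [DecidablePred P] :
    (PySem.Str.join "" (l.map (fun i => if P i then "1" else "0"))).toList
    = l.map (fun i => if P i then '1' else '0') := by
  rw [PySem.Str.toList_join]
  have h : (l.map (fun i => if P i then "1" else "0")).map String.toList
       = (l.map (fun i => if P i then '1' else '0')).map ([·]) := by
    simp only [List.map_map]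
    refine List.map_congr_left (fun i _ => ?_)
    by_cases hP : P i <;> simp [hP]
  rw [h, show ("".toList) = ([] : List Char) from rfl, PySem.Chars.join_nil_singletons]

-- gamma-fold plus epsilon-fold is 2^columns - 1 (the two bit patterns are complementary)
theorem pv_sum (l : List Int) (P : Int → Prop) [DecidablePred P] (a b : Int) :
    l.foldl (fun a i => 2 * a + (if P i then 1 else 0)) a
      + l.foldl (fun a i => 2 * a + (if P i then 0 else 1)) b
    = 2 ^ l.length * (a + b + 1) - 1 := by
  induction l generalizing a b with
  | nil =>
      simp
  | cons x t ih =>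
      simp only [List.foldl_cons, List.length_cons]
      rw [ih]
      split_ifs <;> ring

-- the core identity, with the counts dict abstracted to its specification
theorem pv_main (inp : List String) (C : PySem.Dict Int Int) (L half : Int) (hL : 0 ≤ L)
    (h : ∀ i : Int, 0 ≤ i →
      C.getD i 0 = (inp.countP (fun row => decide (row.toList[i.toNat]? = some '1')) : Int)) :
    pvInt2 (PySem.Str.join "" ((PySem.List.pyRange 0 L).map
        (fun i => if C.getD i 0 > half then "1" else "0"))).toList *
      (((1 <<< L.toNat : Nat) : Int) - pvInt2 (PySem.Str.join "" ((PySem.List.pyRange 0 L).map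
        (fun i => if C.getD i 0 > half then "1" else "0"))).toList - 1)
    = (List.foldl (fun (ge : Int × Int) i =>
        if List.foldl (fun acc row =>
              if i < PySem.Str.len row ∧ PySem.Str.pyGet? row i = some '1' then acc + 1 else acc)
            0 inp > half
        then (ge.1 * 2 + 1, ge.2 * 2) else (ge.1 * 2, ge.2 * 2 + 1))
        (0, 0) (PySem.List.pyRange 0 L)).1 *
      (List.foldl (fun (ge : Int × Int) i =>
        if List.foldl (fun acc row =>
              if i < PySem.Str.len row ∧ PySem.Str.pyGet? row i = some '1' then acc + 1 else acc)
            0 inp > half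
        then (ge.1 * 2 + 1, ge.2 * 2) else (ge.1 * 2, ge.2 * 2 + 1))
        (0, 0) (PySem.List.pyRange 0 L)).2 := by
  have hQ : ∀ i : Int, 0 ≤ i →
      (List.foldl (fun acc row =>
          if i < PySem.Str.len row ∧ PySem.Str.pyGet? row i = some '1' then acc + 1 else acc)
        (0 : Int) inp) = C.getD i 0 := by
    intro i hi
    rw [PySem.List.foldl_ite_add_one, h i hi, zero_add]
    congr 1
    refine List.countP_congr (fun row _ => ?_)
    have hget : PySem.Str.pyGet? row i = row.toList[i.toNat]? := by
      simp [PySem.Str.pyGet?, PySem.List.pyGet?_of_nonneg _ hi]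
    simp only [hget, decide_eq_true_eq]
    constructor
    · exact fun hc => hc.2
    · intro hc
      refine ⟨?_, hc⟩
      have := List.getElem?_eq_some_iff.mp hc
      have hlen : i.toNat < row.toList.length := this.choose
      have : PySem.Str.len row = (row.toList.length : Int) := by
        simp [PySem.Str.len_eq]
      omega
  -- replace B's per-column test by A's dict test
  have hB : ∀ (st : Int × Int), List.foldl (fun (ge : Int × Int) i =>
        if List.foldl (fun acc row =>
              if i < PySem.Str.len row ∧ PySem.Str.pyGet? row i = some '1' then acc + 1 else acc)
            0 inp > half
        then (ge.1 * 2 + 1, ge.2 * 2) else (ge.1 * 2, ge.2 * 2 + 1)) st (PySem.List.pyRange 0 L)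
      = List.foldl (fun (ge : Int × Int) i =>
          ((fun (a : Int) (i : Int) => 2 * a + (if C.getD i 0 > half then 1 else 0)) ge.1 i,
           (fun (a : Int) (i : Int) => 2 * a + (if C.getD i 0 > half then 0 else 1)) ge.2 i))
        st (PySem.List.pyRange 0 L) := by
    intro st
    refine PySem.List.foldl_congr_mem _ _ _ _ (fun ge i hi => ?_)
    have hi0 : 0 ≤ i := (PySem.List.mem_pyRange_one.mp hi).1
    rw [hQ i hi0]
    by_cases hc : C.getD i 0 > half <;> simp [hc] <;> ring_nf <;> exact ⟨trivial, trivial⟩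
  rw [hB, PySem.List.foldl_prod_mk
    (f := fun (a : Int) (i : Int) => 2 * a + (if C.getD i 0 > half then 1 else 0))
    (g := fun (a : Int) (i : Int) => 2 * a + (if C.getD i 0 > half then 0 else 1))]
  -- A's joined bit string, evaluated by pvInt2, is the gamma fold
  have hA : pvInt2 (PySem.Str.join "" ((PySem.List.pyRange 0 L).map
        (fun i => if C.getD i 0 > half then "1" else "0"))).toList
      = List.foldl (fun (a : Int) (i : Int) => 2 * a + (if C.getD i 0 > half then 1 else 0)) 0
          (PySem.List.pyRange 0 L) := by
    rw [pv_toList_join _ (fun i => C.getD i 0 > half)]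
    unfold pvInt2
    rw [List.foldl_map]
    refine PySem.List.foldl_congr_mem _ _ _ _ (fun a i _ => ?_)
    by_cases hc : C.getD i 0 > half <;> simp [hc]
  rw [hA]
  -- complementarity closes the algebra
  have hsum := pv_sum (PySem.List.pyRange 0 L) (fun i => C.getD i 0 > half) 0 0
  have hlen : (PySem.List.pyRange 0 L).length = L.toNat := by
    rw [PySem.List.length_pyRange_one]
    omega
  have hpow : ((1 <<< L.toNat : Nat) : Int) = 2 ^ L.toNat := by
    push_cast [Nat.shiftLeft_eq]
    ring
  rw [hpow]
  rw [hlen] at hsum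
  set g := List.foldl (fun (a : Int) (i : Int) => 2 * a + (if C.getD i 0 > half then 1 else 0)) 0
      (PySem.List.pyRange 0 L)
  set e := List.foldl (fun (a : Int) (i : Int) => 2 * a + (if C.getD i 0 > half then 0 else 1)) 0
      (PySem.List.pyRange 0 L)
  have : e = 2 ^ L.toNat - g - 1 := by linarith [hsum]
  rw [this]

theorem part1_eq_alt (inp : List String) : part1 inp = part1_alt inp := by
  simp only [part1, part1_alt]
  refine pv_main inp _ _ _ ?_ ?_
  · simp [PySem.Str.len_eq]
  · intro i hi
    rw [pv_outer _ _ _ hi, pv_init_getD _ _ (fun j => by simp [PySem.Dict.getD_empty]), zero_add]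


-- ===== VERDICT (by name: the statement is the Claim_ definition above) =====
theorem part1_spec : Claim_equal_part1 := by
  intro inp _ _
  unfold Spec_part1
  exact part1_eq_alt inp
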